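-- pv_equiv track=rewrite | github.com/aiman997/flask-referral | app.py | get_all_referrals
-- ===== SOURCE A (Python) =====
-- def get_all_referrals(email, referral_map, depth=0, seen=None):
--     if seen is None:
--         seen = set()
--     lines = []
--     lower_email = email.lower()
--     # Prevent processing if we've already seen this email
--     if lower_email in seen:
--         return lines
--     seen.add(lower_email)
--
--     referrals = referral_map.get(lower_email, [])
--     for referral in referrals:
--         indent = '>>>> ' * depth if depth > 0 else ''
--         lines.append(f"{indent}{referral}")
--         lines.extend(get_all_referrals(referral, referral_map, depth + 1, seen))
--     return lines
-- ===== SOURCE B (Python) =====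
-- def get_all_referrals(email, referral_map, depth=0, seen=None):
--     if seen is None:
--         seen = set()
--     lines = []
--     stack = [(email, depth, False)]
--     while stack:
--         cur, d, should_print = stack.pop()
--         if should_print:
--             indent = '>>>> ' * (d - 1) if d - 1 > 0 else ''
--             lines.append(f"{indent}{cur}")
--         lc = cur.lower()
--         if lc in seen:
--             continue
--         seen.add(lc)
--         for child in reversed(referral_map.get(lc, [])):
--             stack.append((child, d + 1, True))
--     return lines
-- ===== Notes on version B (the rewrite author's own statement) =====
-- stated objective: alternative
-- what changed: Replaces A's recursive DFS (recursion inside the child loop) by an iterative DFS over an explicit stack of (email, depth, should_print) frames: a line is emitted when a frame is popped, children are pushed in reverse so they pop in original order, and the same seen set is mutated identically.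
import Mathlib
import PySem

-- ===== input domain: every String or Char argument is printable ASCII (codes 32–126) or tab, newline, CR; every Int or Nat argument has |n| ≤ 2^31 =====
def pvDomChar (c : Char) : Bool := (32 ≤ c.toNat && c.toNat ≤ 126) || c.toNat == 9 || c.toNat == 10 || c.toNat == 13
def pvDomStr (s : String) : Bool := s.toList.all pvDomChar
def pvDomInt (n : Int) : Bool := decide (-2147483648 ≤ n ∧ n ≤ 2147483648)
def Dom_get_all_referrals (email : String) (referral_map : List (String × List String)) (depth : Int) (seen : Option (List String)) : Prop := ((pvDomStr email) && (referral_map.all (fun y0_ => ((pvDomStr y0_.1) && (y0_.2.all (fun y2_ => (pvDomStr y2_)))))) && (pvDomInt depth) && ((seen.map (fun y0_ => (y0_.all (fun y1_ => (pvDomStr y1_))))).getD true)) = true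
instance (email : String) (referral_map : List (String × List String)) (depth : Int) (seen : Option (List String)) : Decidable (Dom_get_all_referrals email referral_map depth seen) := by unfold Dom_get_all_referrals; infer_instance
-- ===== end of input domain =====

-- B replaces A's recursive DFS by an iterative DFS over an explicit stack of
-- (email, depth, should_print) frames (objective: alternative decomposition, same cost).
-- Both A and B mutate the caller-supplied `seen` set identically (same adds, same order);
-- the equivalence proved here is about the RETURN value.
-- The Nat fuel in each port is only a termination guard, sized so that it never runs out
-- (A's recursion deepens only after a new key is added to `seen`; B pops at most one frame
-- per pushed referral plus the root, and pushes only when a new key is added to `seen`).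

-- ===== PORT A =====
def pvIndentA (depth : Int) : String :=
  if depth > 0 then String.join (List.replicate depth.toNat ">>>> ") else ""

-- the recursive body of A; the Nat fuel is only a termination guard (a bound on the
-- recursion depth, which grows only when a new key is added to `seen`), sized in
-- get_all_referrals so that it never runs out
def pvGoA (rm : List (String × List String)) : Nat → String → Int → PySem.Set String → (List String × PySem.Set String)
  | 0, _, _, seen => ([], seen)
  | Nat.succ n, email, depth, seen =>
    let lower_email := PySem.Str.lower email
    if PySem.Set.contains seen lower_email then ([], seen)
    else
      let seen1 := PySem.Set.add seen lower_email
      let referrals := (PySem.Dict.mk rm).getD lower_email []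
      referrals.foldl (fun acc r =>
        let res := pvGoA rm n r (depth + 1) acc.2
        (acc.1 ++ [pvIndentA depth ++ r] ++ res.1, res.2)) ([], seen1)

def get_all_referrals (email : String) (referral_map : List (String × List String)) (depth : Int) (seen : Option (List String)) : List String :=
  let seen0 := match seen with | none => PySem.Set.empty | some l => PySem.Set.ofList l
  let fuel := ((PySem.List.dedup (referral_map.map Prod.fst)).map
    (fun k => ((PySem.Dict.mk referral_map).getD k []).length)).sum + 2
  (pvGoA referral_map fuel email depth seen0).1

-- ===== PORT B =====
def pvIndentB (d : Int) : String :=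
  if d - 1 > 0 then String.join (List.replicate (d - 1).toNat ">>>> ") else ""

-- Source B's 'while stack' loop; the stack's top is the list head (python appends/pops at the end)
def pvLoopB (rm : List (String × List String)) : Nat → List (String × Int × Bool) → PySem.Set String → List String → List String
  | 0, _, _, lines => lines
  | _ + 1, [], _, lines => lines
  | Nat.succ n, (cur, d, should_print) :: rest, seen, lines =>
    let lines1 := if should_print then lines ++ [pvIndentB d ++ cur] else lines
    let lc := PySem.Str.lower cur
    if PySem.Set.contains seen lc then pvLoopB rm n rest seen lines1
    else
      let seen1 := PySem.Set.add seen lc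
      let children := (PySem.Dict.mk rm).getD lc []
      let stack1 := children.reverse.foldl (fun st c => (c, d + 1, true) :: st) rest
      pvLoopB rm n stack1 seen1 lines1

def get_all_referrals_alt (email : String) (referral_map : List (String × List String)) (depth : Int) (seen : Option (List String)) : List String :=
  let seen0 := match seen with | none => PySem.Set.empty | some l => PySem.Set.ofList l
  let fuel := ((PySem.List.dedup (referral_map.map Prod.fst)).map
    (fun k => ((PySem.Dict.mk referral_map).getD k []).length)).sum + 1
  pvLoopB referral_map fuel [(email, depth, false)] seen0 []

-- ===== PRECONDITION & SPEC =====
def Spec_get_all_referrals (email : String) (referral_map : List (String × List String)) (depth : Int) (seen : Option (List String)) (out : List String) : Prop := out = get_all_referrals_alt email referral_map depth seen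
instance (email : String) (referral_map : List (String × List String)) (depth : Int) (seen : Option (List String)) (out : List String) : Decidable (Spec_get_all_referrals email referral_map depth seen out) := by unfold Spec_get_all_referrals; infer_instance

-- ===== CLAIM (what is proved, stated in full; the proofs are below) =====
def Claim_equal_get_all_referrals : Prop := ∀ (email : String) (referral_map : List (String × List String)) (depth : Int) (seen : Option (List String)), Dom_get_all_referrals email referral_map depth seen → Spec_get_all_referrals email referral_map depth seen (get_all_referrals email referral_map depth seen)

-- ===== LEMMAS AND PROOFS =====
-- proof-side twins of A's recursion with the fuel threaded through the child loop
-- (one unit per processed node), mirroring pvLoopB's one-unit-per-pop consumption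
mutual
-- the recursive body of A ('lines' for one email); returns (lines, seen, remaining fuel)
def pvGoT (rm : List (String × List String)) : Nat → String → Int → PySem.Set String → (List String × PySem.Set String × Nat)
  | 0, _, _, seen => ([], seen, 0)
  | Nat.succ n, email, depth, seen =>
    let lower_email := PySem.Str.lower email
    if PySem.Set.contains seen lower_email then ([], seen, n)
    else
      let seen1 := PySem.Set.add seen lower_email
      let referrals := (PySem.Dict.mk rm).getD lower_email []
      pvGoListT rm n referrals depth seen1
  termination_by fuel _ _ _ => (fuel, 0)
  decreasing_by exact Prod.Lex.left _ _ (Nat.lt_succ_self n)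
-- A's 'for referral in referrals' loop
def pvGoListT (rm : List (String × List String)) : Nat → List String → Int → PySem.Set String → (List String × PySem.Set String × Nat)
  | fuel, [], _, seen => ([], seen, fuel)
  | fuel, r :: rest, depth, seen =>
    let line := pvIndentA depth ++ r
    let res1 := pvGoT rm fuel r (depth + 1) seen
    let res2 := pvGoListT rm (min res1.2.2 fuel) rest depth res1.2.1
    (line :: (res1.1 ++ res2.1), res2.2)
  termination_by fuel l _ _ => (fuel, l.length + 1)
  decreasing_by
  · exact Prod.Lex.right _ (by omega)
  · rcases Nat.lt_or_ge (min res1.2.2 fuel) fuel with h | h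
    · exact Prod.Lex.left _ _ h
    · have h2 : min res1.2.2 fuel = fuel := by omega
      rw [h2]; exact Prod.Lex.right _ (by simp)
end

def pvW (rm : List (String × List String)) (s : List String) : Nat :=
  ((PySem.List.dedup (rm.map Prod.fst)).map
    (fun k => if k ∈ s then 0 else ((PySem.Dict.mk rm).getD k []).length)).sum

lemma pvLoopB_nil (rm : List (String × List String)) (f : Nat) (s : PySem.Set String) (acc : List String) :
    pvLoopB rm f [] s acc = acc := by cases f <;> rfl

lemma pvGoListT_fuel_le (rm : List (String × List String)) (l : List String) :
    ∀ (fuel : Nat) (d : Int) (s : PySem.Set String), (pvGoListT rm fuel l d s).2.2 ≤ fuel := by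
  induction l with
  | nil => intro fuel d s; simp [pvGoListT]
  | cons r rest ih =>
    intro fuel d s
    rw [pvGoListT]
    exact le_trans (ih _ _ _) (by omega)

lemma pvGoT_fuel_le (rm : List (String × List String)) (f : Nat) (e : String) (d : Int) (s : PySem.Set String) :
    (pvGoT rm f e d s).2.2 ≤ f := by
  cases f with
  | zero => simp [pvGoT]
  | succ n =>
    rw [pvGoT]
    split
    · simp
    · exact le_trans (pvGoListT_fuel_le rm _ n d _) (by omega)

lemma pvGoT_fuel_lt (rm : List (String × List String)) (f : Nat) (e : String) (d : Int) (s : PySem.Set String)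
    (hf : 1 ≤ f) : (pvGoT rm f e d s).2.2 < f := by
  cases f with
  | zero => omega
  | succ n =>
    rw [pvGoT]
    split
    · simp
    · exact lt_of_le_of_lt (pvGoListT_fuel_le rm _ n d _) (by omega)

lemma pvGoListT_cons (rm : List (String × List String)) (fuel : Nat) (r : String) (rest : List String)
    (d : Int) (s : PySem.Set String) :
    pvGoListT rm fuel (r :: rest) d s =
      ((pvIndentA d ++ r) :: ((pvGoT rm fuel r (d + 1) s).1 ++ (pvGoListT rm (pvGoT rm fuel r (d + 1) s).2.2 rest d (pvGoT rm fuel r (d + 1) s).2.1).1),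
       (pvGoListT rm (pvGoT rm fuel r (d + 1) s).2.2 rest d (pvGoT rm fuel r (d + 1) s).2.1).2) := by
  rw [pvGoListT]
  rw [Nat.min_eq_left (pvGoT_fuel_le rm fuel r (d+1) s)]
lemma pvW_le (rm : List (String × List String)) (s t : List String)
    (h : ∀ k, k ∈ s → k ∈ t) : pvW rm t ≤ pvW rm s := by
  unfold pvW
  apply List.sum_le_sum
  intro k _
  by_cases hk : k ∈ s
  · simp [hk, h k hk]
  · simp [hk]
    split <;> simp

lemma pvW_aux (s : List String) (x : String) (w : String → Nat) (hx : x ∉ s) :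
    ∀ (l : List String), l.Nodup → x ∈ l →
      w x + (l.map (fun k => if k ∈ PySem.Set.add s x then 0 else w k)).sum
        ≤ (l.map (fun k => if k ∈ s then 0 else w k)).sum := by
  intro l
  induction l with
  | nil => simp
  | cons a rest ih =>
    intro hnd hmem
    have hnd' := List.nodup_cons.mp hnd
    rcases List.mem_cons.mp hmem with rfl | hlm
    · -- a = x
      have h1 : x ∈ PySem.Set.add s x := by rw [PySem.Set.mem_add]; right; rfl
      simp only [List.map_cons, List.sum_cons, h1, if_pos]
      rw [if_neg hx]
      have : ((rest.map (fun k => if k ∈ PySem.Set.add s x then 0 else w k)).sum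
            ≤ (rest.map (fun k => if k ∈ s then 0 else w k)).sum) := by
        apply List.sum_le_sum
        intro k _
        by_cases hk : k ∈ s
        · have : k ∈ PySem.Set.add s x := by rw [PySem.Set.mem_add]; left; exact hk
          simp [hk, this]
        · simp [hk]; split <;> simp
      omega
    · -- x ∈ rest, a ≠ x
      have hax : a ≠ x := by rintro rfl; exact hnd'.1 hlm
      have heq : (a ∈ PySem.Set.add s x) ↔ (a ∈ s) := by
        rw [PySem.Set.mem_add]
        constructor
        · rintro (h | rfl); exact h; exact absurd rfl hax
        · exact Or.inl
      have := ih hnd'.2 hlm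
      by_cases ha : a ∈ s
      · simp only [List.map_cons, List.sum_cons, ha, if_pos, heq.mpr ha]
        omega
      · have ha' : a ∉ PySem.Set.add s x := fun h => ha (heq.mp h)
        simp only [List.map_cons, List.sum_cons, ha, ha']
        omega

lemma pvW_expand (rm : List (String × List String)) (s : List String) (x : String)
    (hx : x ∉ s) (hk : x ∈ rm.map Prod.fst) :
    ((PySem.Dict.mk rm).getD x []).length + pvW rm (PySem.Set.add s x) ≤ pvW rm s := by
  unfold pvW
  exact pvW_aux s x (fun k => ((PySem.Dict.mk rm).getD k []).length) hx _ (PySem.List.nodup_dedup _) ((PySem.List.mem_dedup _ _).mpr hk)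
lemma pvGetD_not_mem (rm : List (String × List String)) (x : String)
    (hx : x ∉ rm.map Prod.fst) : (PySem.Dict.mk rm).getD x [] = [] := by
  induction rm with
  | nil => rfl
  | cons p rest ih =>
    have hne : p.1 ≠ x := by intro h; exact hx (by simp [h])
    rw [PySem.Dict.getD_eq_get?_getD]
    rw [show (PySem.Dict.mk (p :: rest)) = (PySem.Dict.mk ((p.1, p.2) :: rest)) by rfl]
    rw [PySem.Dict.get?_mk_cons]
    simp only [beq_iff_eq, hne, if_false]
    rw [← PySem.Dict.getD_eq_get?_getD]
    exact ih (fun h => hx (by simp at h ⊢; tauto))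

lemma pvFoldlRev (l : List String) (d : Int) :
    ∀ st : List (String × Int × Bool),
      l.reverse.foldl (fun st c => (c, d, true) :: st) st = l.map (fun c => (c, d, true)) ++ st := by
  induction l with
  | nil => intro st; rfl
  | cons a rest ih =>
    intro st
    simp only [List.reverse_cons, List.foldl_append, List.foldl_cons, List.foldl_nil, ih]
    simp

lemma pvIndentBA (d : Int) : pvIndentB (d + 1) = pvIndentA d := by
  unfold pvIndentA pvIndentB
  simp
lemma pvMain (rm : List (String × List String)) : ∀ f : Nat,
    (∀ (e : String) (d : Int) (b : Bool) (st : List (String × Int × Bool)) (acc : List String) (s : PySem.Set String),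
      1 + st.length + pvW rm s ≤ f →
      pvLoopB rm f ((e, d, b) :: st) s acc
        = pvLoopB rm (pvGoT rm f e d s).2.2 st (pvGoT rm f e d s).2.1
            ((if b then acc ++ [pvIndentB d ++ e] else acc) ++ (pvGoT rm f e d s).1)
      ∧ st.length + pvW rm (pvGoT rm f e d s).2.1 ≤ (pvGoT rm f e d s).2.2)
    ∧
    (∀ (l : List String) (d : Int) (st : List (String × Int × Bool)) (acc : List String) (s : PySem.Set String),
      l.length + st.length + pvW rm s ≤ f →
      pvLoopB rm f (l.map (fun c => (c, d + 1, true)) ++ st) s acc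
        = pvLoopB rm (pvGoListT rm f l d s).2.2 st (pvGoListT rm f l d s).2.1 (acc ++ (pvGoListT rm f l d s).1)
      ∧ st.length + pvW rm (pvGoListT rm f l d s).2.1 ≤ (pvGoListT rm f l d s).2.2) := by
  intro f
  induction f using Nat.strong_induction_on with
  | _ f IH =>
  have hP : (∀ (e : String) (d : Int) (b : Bool) (st : List (String × Int × Bool)) (acc : List String) (s : PySem.Set String),
      1 + st.length + pvW rm s ≤ f →
      pvLoopB rm f ((e, d, b) :: st) s acc
        = pvLoopB rm (pvGoT rm f e d s).2.2 st (pvGoT rm f e d s).2.1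
            ((if b then acc ++ [pvIndentB d ++ e] else acc) ++ (pvGoT rm f e d s).1)
      ∧ st.length + pvW rm (pvGoT rm f e d s).2.1 ≤ (pvGoT rm f e d s).2.2) := by
    intro e d b st acc s hf
    match f with
    | 0 => omega
    | Nat.succ n =>
    rw [pvLoopB, pvGoT]
    dsimp only
    by_cases hc : PySem.Set.contains s (PySem.Str.lower e) = true
    · rw [if_pos hc, if_pos hc]
      refine ⟨by simp, by simpa using (by omega : st.length + pvW rm s ≤ n)⟩
    · rw [if_neg hc, if_neg hc]
      have hmem : PySem.Str.lower e ∉ s := by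
        intro h; exact hc ((PySem.Set.contains_iff _ _).mpr h)
      have hbound : ((PySem.Dict.mk rm).getD (PySem.Str.lower e) []).length
            + pvW rm (PySem.Set.add s (PySem.Str.lower e)) ≤ pvW rm s := by
        by_cases hk : PySem.Str.lower e ∈ rm.map Prod.fst
        · exact pvW_expand rm s _ hmem hk
        · rw [pvGetD_not_mem rm _ hk]
          simpa using pvW_le rm s _ (fun k hk2 => by rw [PySem.Set.mem_add]; left; exact hk2)
      have hQ := (IH n (Nat.lt_succ_self n)).2
        ((PySem.Dict.mk rm).getD (PySem.Str.lower e) []) d st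
        (if b then acc ++ [pvIndentB d ++ e] else acc)
        (PySem.Set.add s (PySem.Str.lower e))
        (by omega)
      rw [pvFoldlRev]
      exact hQ
  refine ⟨hP, ?_⟩
  intro l d st acc s hl
  cases l with
  | nil =>
    rw [pvGoListT]
    simp only [List.map_nil, List.nil_append, List.append_nil, List.length_nil] at hl ⊢
    exact ⟨trivial, by omega⟩
  | cons r rest =>
    simp only [List.length_cons] at hl
    have hf1 : 1 ≤ f := by omega
    have h1 := hP r (d + 1) true (rest.map (fun c => (c, d + 1, true)) ++ st) acc s
      (by simp only [List.length_append, List.length_map]; omega)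
    simp only [if_pos] at h1
    have hn1lt : (pvGoT rm f r (d + 1) s).2.2 < f := pvGoT_fuel_lt rm f r (d+1) s hf1
    have h2 := (IH _ hn1lt).2 rest d st
      ((acc ++ [pvIndentB (d + 1) ++ r]) ++ (pvGoT rm f r (d + 1) s).1)
      (pvGoT rm f r (d + 1) s).2.1
      (by
        have := h1.2
        simp only [List.length_append, List.length_map] at this
        omega)
    rw [pvGoListT_cons]
    dsimp only
    rw [← pvIndentBA]
    constructor
    · rw [List.map_cons, List.cons_append, h1.1, h2.1]
      simp
    · exact h2.2
lemma pvGetD_mem (rm : List (String × List String)) (x : String)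
    (h : (PySem.Dict.mk rm).getD x [] ≠ []) : x ∈ rm.map Prod.fst := by
  by_contra hx
  exact h (pvGetD_not_mem rm x hx)

lemma pvSubT (rm : List (String × List String)) : ∀ g : Nat,
    (∀ (e : String) (d : Int) (s : PySem.Set String) (k : String),
      k ∈ s → k ∈ (pvGoT rm g e d s).2.1)
    ∧ (∀ (g' : Nat), g' ≤ g → ∀ (l : List String) (d : Int) (s : PySem.Set String) (k : String),
      k ∈ s → k ∈ (pvGoListT rm g' l d s).2.1) := by
  intro g
  induction g using Nat.strong_induction_on with
  | _ g IH =>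
  have hQ : ∀ (l : List String) (g' : Nat), g' ≤ g → ∀ (d : Int) (s : PySem.Set String) (k : String),
      k ∈ s → k ∈ (pvGoListT rm g' l d s).2.1 := by
    intro l
    induction l with
    | nil => intro g' hg' d s k hk; rw [pvGoListT]; exact hk
    | cons r rest ih =>
      intro g' hg' d s k hk
      rw [pvGoListT_cons]
      dsimp only
      have h1 : k ∈ (pvGoT rm g' r (d + 1) s).2.1 := by
        rcases Nat.lt_or_ge g' g with h | h
        · exact (IH g' h).1 r (d+1) s k hk
        · have hgg : g' = g := by omega
          subst hgg
          -- first component at the same fuel: prove directly by cases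
          cases g' with
          | zero => rw [pvGoT]; exact hk
          | succ n =>
            rw [pvGoT]
            dsimp only
            split
            · exact hk
            · refine (IH n (Nat.lt_succ_self n)).2 n (le_refl n) _ (d + 1) _ k ?_
              rw [PySem.Set.mem_add]; left; exact hk
      exact ih _ (le_trans (pvGoT_fuel_le rm g' r (d+1) s) hg') d _ k h1
  refine ⟨?_, fun g' hg' l => hQ l g' hg'⟩
  intro e d s k hk
  cases g with
  | zero => rw [pvGoT]; exact hk
  | succ n =>
    rw [pvGoT]
    dsimp only
    split
    · exact hk
    · refine hQ _ n (by omega) d _ k ?_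
      rw [PySem.Set.mem_add]; left; exact hk
lemma pvAT (rm : List (String × List String)) : ∀ g : Nat,
    (∀ (f : Nat) (e : String) (d : Int) (s : PySem.Set String),
      pvW rm s + 2 ≤ f → 1 + pvW rm s ≤ g →
      pvGoA rm f e d s = ((pvGoT rm g e d s).1, (pvGoT rm g e d s).2.1))
    ∧ (∀ (n : Nat) (l : List String) (d : Int) (s : PySem.Set String) (acc0 : List String),
      pvW rm s + 2 ≤ n → l.length + pvW rm s ≤ g →
      l.foldl (fun acc r =>
          let res := pvGoA rm n r (d + 1) acc.2
          (acc.1 ++ [pvIndentA d ++ r] ++ res.1, res.2)) (acc0, s)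
        = (acc0 ++ (pvGoListT rm g l d s).1, (pvGoListT rm g l d s).2.1)) := by
  intro g
  induction g using Nat.strong_induction_on with
  | _ g IH =>
  have hP : (∀ (f : Nat) (e : String) (d : Int) (s : PySem.Set String),
      pvW rm s + 2 ≤ f → 1 + pvW rm s ≤ g →
      pvGoA rm f e d s = ((pvGoT rm g e d s).1, (pvGoT rm g e d s).2.1)) := by
    intro f e d s hf hg
    match f with
    | 0 => omega
    | Nat.succ n =>
    match g with
    | 0 => omega
    | Nat.succ m =>
    rw [pvGoA, pvGoT]
    dsimp only
    by_cases hc : PySem.Set.contains s (PySem.Str.lower e) = true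
    · rw [if_pos hc, if_pos hc]
    · rw [if_neg hc, if_neg hc]
      by_cases hemp : (PySem.Dict.mk rm).getD (PySem.Str.lower e) [] = []
      · rw [hemp]
        simp [pvGoListT]
      · have hkey := pvGetD_mem rm _ hemp
        have hmem : PySem.Str.lower e ∉ s := fun h => hc ((PySem.Set.contains_iff _ _).mpr h)
        have hexp := pvW_expand rm s _ hmem hkey
        have hlen : 1 ≤ ((PySem.Dict.mk rm).getD (PySem.Str.lower e) []).length := by
          rcases Nat.eq_zero_or_pos ((PySem.Dict.mk rm).getD (PySem.Str.lower e) []).length with h0 | h0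
          · exact absurd (List.length_eq_zero_iff.mp h0) hemp
          · omega
        have hQm := (IH m (Nat.lt_succ_self m)).2 n
          ((PySem.Dict.mk rm).getD (PySem.Str.lower e) []) d
          (PySem.Set.add s (PySem.Str.lower e)) []
          (by omega) (by omega)
        rw [hQm]
        simp
  refine ⟨hP, ?_⟩
  intro n l d s acc0 hn hg
  cases l with
  | nil => simp [pvGoListT]
  | cons r rest =>
    simp only [List.length_cons] at hg
    have hg1 : 1 ≤ g := by omega
    have h1 := hP n r (d + 1) s hn (by omega)
    have haux := ((pvMain rm g).1 r (d + 1) true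
      (List.replicate rest.length ("", (0 : Int), false)) [] s
      (by simp only [List.length_replicate]; omega)).2
    simp only [List.length_replicate] at haux
    have hsub : pvW rm (pvGoT rm g r (d + 1) s).2.1 ≤ pvW rm s :=
      pvW_le rm s _ (fun k hk => (pvSubT rm g).1 r (d + 1) s k hk)
    have h2 := (IH (pvGoT rm g r (d + 1) s).2.2 (pvGoT_fuel_lt rm g r (d + 1) s hg1)).2 n rest d
      (pvGoT rm g r (d + 1) s).2.1
      (acc0 ++ [pvIndentA d ++ r] ++ (pvGoT rm g r (d + 1) s).1)
      (by omega) (by omega)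
    rw [List.foldl_cons]
    dsimp only
    rw [h1]
    dsimp only
    rw [h2, pvGoListT_cons]
    dsimp only
    simp

theorem get_all_referrals_spec : Claim_equal_get_all_referrals := by
  intro email rm depth seen _
  unfold Spec_get_all_referrals get_all_referrals get_all_referrals_alt
  have key : ∀ s0 : PySem.Set String,
      (pvGoA rm (((PySem.List.dedup (rm.map Prod.fst)).map
          (fun k => ((PySem.Dict.mk rm).getD k []).length)).sum + 2) email depth s0).1
        = pvLoopB rm (((PySem.List.dedup (rm.map Prod.fst)).map
          (fun k => ((PySem.Dict.mk rm).getD k []).length)).sum + 1) [(email, depth, false)] s0 [] := by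
    intro s0
    have hW : pvW rm s0 ≤ pvW rm [] := pvW_le rm [] s0 (by simp)
    have hWnil : pvW rm [] = ((PySem.List.dedup (rm.map Prod.fst)).map
        (fun k => ((PySem.Dict.mk rm).getD k []).length)).sum := by
      unfold pvW; simp
    have hAT := (pvAT rm (((PySem.List.dedup (rm.map Prod.fst)).map
          (fun k => ((PySem.Dict.mk rm).getD k []).length)).sum + 1)).1
      (((PySem.List.dedup (rm.map Prod.fst)).map
          (fun k => ((PySem.Dict.mk rm).getD k []).length)).sum + 2)
      email depth s0 (by omega) (by omega)
    have h := ((pvMain rm (((PySem.List.dedup (rm.map Prod.fst)).map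
          (fun k => ((PySem.Dict.mk rm).getD k []).length)).sum + 1)).1 email depth false [] [] s0
      (by simp only [List.length_nil]; omega)).1
    rw [h, pvLoopB_nil, hAT]
    simp
  dsimp only
  exact key _
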